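-- pv_equiv track=rewrite | github.com/jerryxu178/mini-watson | parse_question.py | get_proper_n
-- ===== SOURCE A (Python) =====
-- def get_proper_n(tagged_tokens):
-- 	"""
-- 	Retrieves all proper nouns from question, and returns them in a list
-- 	"""
-- 	named_entities = []
-- 	curr_token = ""
-- 	for token in tagged_tokens:
-- 		if token[1] == "NNP" or token[1] == "NNPS":
-- 			curr_token += " " + token[0]
-- 		else:
-- 			if curr_token != "":
-- 				named_entities.append(curr_token.strip())
-- 				curr_token = ""
-- 	if curr_token != "":
-- 		named_entities.append(curr_token.strip())
-- 	return named_entities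
-- ===== SOURCE B (Python) =====
-- def get_proper_n(tagged_tokens):
--     """
--     Retrieves all proper nouns from question, and returns them in a list
--     """
--     def is_proper(t):
--         return t[1] == "NNP" or t[1] == "NNPS"
--     result = []
--     i, n = 0, len(tagged_tokens)
--     while i < n:
--         if is_proper(tagged_tokens[i]):
--             j = i
--             while j < n and is_proper(tagged_tokens[j]):
--                 j += 1
--             result.append(" ".join(t[0] for t in tagged_tokens[i:j]).strip())
--             i = j
--         else:
--             i += 1
--     return result
-- ===== Notes on version B (the rewrite author's own statement) =====
-- stated objective: alternative
-- what changed: Replaces A's running curr_token string accumulator with explicit end-of-loop flush by an index scan that delineates each maximal run of NNP/NNPS tokens and emits ' '.join(words).strip() per run.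
import Mathlib
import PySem

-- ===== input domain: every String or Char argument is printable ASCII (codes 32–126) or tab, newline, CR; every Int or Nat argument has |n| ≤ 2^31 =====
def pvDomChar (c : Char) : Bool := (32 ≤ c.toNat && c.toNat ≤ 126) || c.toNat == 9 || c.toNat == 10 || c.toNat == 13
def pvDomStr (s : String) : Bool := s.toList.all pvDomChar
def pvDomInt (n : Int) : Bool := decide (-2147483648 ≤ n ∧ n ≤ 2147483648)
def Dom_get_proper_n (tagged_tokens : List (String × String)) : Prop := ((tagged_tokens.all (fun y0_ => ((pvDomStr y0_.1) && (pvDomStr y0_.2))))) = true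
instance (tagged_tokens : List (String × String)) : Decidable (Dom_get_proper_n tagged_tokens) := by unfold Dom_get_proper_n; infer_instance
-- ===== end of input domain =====

-- B replaces A's running-string accumulator and end-of-loop flush by scanning each
-- maximal run of NNP/NNPS tokens at once and joining its words ("alternative" decomposition).


-- ===== PORT A =====
-- the loop body: state = (named_entities, curr_token)
def pvStepA (st : List String × String) (token : String × String) : List String × String :=
  if token.2 == "NNP" || token.2 == "NNPS" then (st.1, st.2 ++ " " ++ token.1)
  else if st.2 ≠ "" then (st.1 ++ [PySem.Str.strip st.2], "") else st

def get_proper_n (tagged_tokens : List (String × String)) : List String :=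
  let st := tagged_tokens.foldl pvStepA ([], "")
  if st.2 ≠ "" then st.1 ++ [PySem.Str.strip st.2] else st.1

-- ===== PORT B =====
def pvIsProper (t : String × String) : Bool := t.2 == "NNP" || t.2 == "NNPS"

-- B: peel off each maximal run of proper-noun tokens (the inner `while j < n` scan =
-- takeWhile/dropWhile), join its words with " " and strip; skip single non-proper tokens.
def get_proper_n_alt : List (String × String) → List String
  | [] => []
  | t :: ts =>
    if pvIsProper t then
      PySem.Str.strip (PySem.Str.join " " (((t :: ts).takeWhile pvIsProper).map Prod.fst))
        :: get_proper_n_alt ((t :: ts).dropWhile pvIsProper)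
    else get_proper_n_alt ts
termination_by tt => tt.length
decreasing_by
  · simp_all
    exact List.length_dropWhile_le _ _
  · simp

-- ===== PRECONDITION & SPEC =====
def Spec_get_proper_n (tagged_tokens : List (String × String)) (out : List String) : Prop := out = get_proper_n_alt tagged_tokens
instance (tagged_tokens : List (String × String)) (out : List String) : Decidable (Spec_get_proper_n tagged_tokens out) := by unfold Spec_get_proper_n; infer_instance

-- ===== CLAIM (what is proved, stated in full; the proofs are below) =====
def Claim_equal_get_proper_n : Prop := ∀ (tagged_tokens : List (String × String)), Dom_get_proper_n tagged_tokens → Spec_get_proper_n tagged_tokens (get_proper_n tagged_tokens)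

-- ===== LEMMAS AND PROOFS =====

-- the final flush of A's loop
def pvFinishA (st : List String × String) : List String :=
  if st.2 ≠ "" then st.1 ++ [PySem.Str.strip st.2] else st.1

lemma get_proper_n_eq_finish (tt : List (String × String)) :
    get_proper_n tt = pvFinishA (tt.foldl pvStepA ([], "")) := rfl

-- folding A's step over a run of proper tokens only extends curr_token
lemma foldl_stepA_run (run : List (String × String)) (acc : List String) (curr : String)
    (h : ∀ t ∈ run, pvIsProper t = true) :
    run.foldl pvStepA (acc, curr) = (acc, run.foldl (fun c t => c ++ " " ++ t.1) curr) := by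
  induction run generalizing curr with
  | nil => rfl
  | cons t ts ih =>
    have ht : pvIsProper t = true := h t (by simp)
    simp only [List.foldl_cons]
    rw [show pvStepA (acc, curr) t = (acc, curr ++ " " ++ t.1) by
      simp [pvStepA, pvIsProper] at ht ⊢; cases ht with
      | inl h' => simp [h']
      | inr h' => simp [h']]
    exact ih _ (fun t ht' => h t (by simp [ht']))

-- the accumulated string as a list of chars
lemma foldl_cat_toList (run : List (String × String)) (c : String) :
    (run.foldl (fun acc t => acc ++ " " ++ t.1) c).toList
      = c.toList ++ (run.map (fun t => ' ' :: t.1.toList)).flatten := by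
  induction run generalizing c with
  | nil => simp
  | cons t ts ih => simp [ih, String.toList_append]

lemma flatten_space (ws : List (List Char)) (w : List Char) :
    ((w :: ws).map (fun l => ' ' :: l)).flatten = ' ' :: PySem.Chars.join [' '] (w :: ws) := by
  induction ws generalizing w with
  | nil => simp [PySem.Chars.join_singleton]
  | cons u us ih =>
    simp only [List.map_cons, List.flatten_cons] at *
    rw [PySem.Chars.join_cons_cons]
    simp [ih u]

lemma flatten_space_cons (w : List (String × String)) (t : String × String) :
    ((t :: w).map (fun t => ' ' :: t.1.toList)).flatten
      = ' ' :: PySem.Chars.join [' '] ((t :: w).map (fun t => t.1.toList)) := by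
  have h : (t :: w).map (fun t => ' ' :: t.1.toList)
      = (t.1.toList :: w.map (fun t => t.1.toList)).map (fun l => ' ' :: l) := by
    simp [Function.comp]
  rw [h, flatten_space]
  simp

lemma strip_space_cons (l : List Char) : PySem.Chars.strip (' ' :: l) = PySem.Chars.strip l := by
  simp [PySem.Chars.strip, PySem.Chars.lstrip, PySem.Chars.isspace]

lemma ne_empty_of_toList_cons (s : String) (c : Char) (l : List Char)
    (h : s.toList = c :: l) : s ≠ "" := by
  intro hc; subst hc; simp at h

-- the run's accumulated string strips to B's joined-and-stripped phrase
lemma strip_cat_eq_strip_join (t : String × String) (w : List (String × String)) :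
    PySem.Str.strip ((t :: w).foldl (fun c t => c ++ " " ++ t.1) "")
      = PySem.Str.strip (PySem.Str.join " " ((t :: w).map Prod.fst)) := by
  rw [← String.toList_inj, PySem.Str.toList_strip, PySem.Str.toList_strip,
    foldl_cat_toList, flatten_space_cons, PySem.Str.toList_join]
  simp [strip_space_cons, Function.comp_def]

lemma cat_run_ne_empty (t : String × String) (w : List (String × String)) :
    (t :: w).foldl (fun c t => c ++ " " ++ t.1) "" ≠ "" := by
  apply ne_empty_of_toList_cons _ ' '
    (PySem.Chars.join [' '] ((t :: w).map (fun t => t.1.toList)))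
  rw [foldl_cat_toList, flatten_space_cons]; rfl

-- main invariant: running A's loop from a flushed state and then flushing
-- produces exactly the runs B emits, appended to the accumulator
lemma mainA (tt : List (String × String)) :
    ∀ acc : List String,
      pvFinishA (tt.foldl pvStepA (acc, "")) = acc ++ get_proper_n_alt tt := by
  induction tt using get_proper_n_alt.induct with
  | case1 => intro acc; simp [pvFinishA, get_proper_n_alt]
  | case2 t ts ht ih =>
    intro acc
    have hdecomp := List.takeWhile_append_dropWhile (p := pvIsProper) (l := t :: ts)
    set run := (t :: ts).takeWhile pvIsProper with hrun
    set rest := (t :: ts).dropWhile pvIsProper with hrest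
    have hrun_cons : run = t :: ts.takeWhile pvIsProper := by
      simp [hrun, ht]
    have hall : ∀ x ∈ run, pvIsProper x = true := fun x hx => List.mem_takeWhile_imp hx
    have hscat : ∀ (a : List String),
        (t :: ts).foldl pvStepA (a, "") =
          rest.foldl pvStepA (a, run.foldl (fun c t => c ++ " " ++ t.1) "") := by
      intro a
      conv_lhs => rw [← hdecomp]
      rw [List.foldl_append, foldl_stepA_run run a "" hall]
    set scat := run.foldl (fun c t => c ++ " " ++ t.1) "" with hscatdef
    have hne : scat ≠ "" := by rw [hscatdef, hrun_cons]; exact cat_run_ne_empty _ _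
    have hstrip : PySem.Str.strip scat
        = PySem.Str.strip (PySem.Str.join " " (run.map Prod.fst)) := by
      rw [hscatdef, hrun_cons]; exact strip_cat_eq_strip_join _ _
    have halt : get_proper_n_alt (t :: ts)
        = PySem.Str.strip (PySem.Str.join " " (run.map Prod.fst)) :: get_proper_n_alt rest := by
      rw [get_proper_n_alt]; simp [ht, ← hrun, ← hrest]
    rw [hscat acc, halt, ← hstrip]
    cases hr : rest with
    | nil => simp [pvFinishA, hne, get_proper_n_alt]
    | cons r rs =>
      have hrprop : pvIsProper r = false := by
        have := List.head?_dropWhile_not pvIsProper (t :: ts)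
        rw [← hrest, hr] at this; simpa using this
      have hstep : pvStepA (acc, scat) r = (acc ++ [PySem.Str.strip scat], "") := by
        simp [pvStepA, pvIsProper] at hrprop ⊢
        simp [hrprop.1, hrprop.2, hne]
      have hstep0 : pvStepA (acc ++ [PySem.Str.strip scat], "") r
          = (acc ++ [PySem.Str.strip scat], "") := by
        simp [pvStepA, pvIsProper] at hrprop ⊢
        simp [hrprop.1, hrprop.2]
      rw [List.foldl_cons, hstep]
      have hihr := ih (acc ++ [PySem.Str.strip scat])
      rw [hr, List.foldl_cons, hstep0] at hihr
      rw [hihr]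
      simp
  | case3 t ts ht ih =>
    intro acc
    have hstep : pvStepA (acc, "") t = (acc, "") := by
      simp [pvStepA, pvIsProper] at ht ⊢; simp [ht.1, ht.2]
    rw [List.foldl_cons, hstep, ih acc, get_proper_n_alt]
    simp [ht]

-- ===== VERDICT (by name: the statement is the Claim_ definition above) =====
theorem get_proper_n_spec : Claim_equal_get_proper_n := by
  intro tt _
  unfold Spec_get_proper_n
  rw [get_proper_n_eq_finish]
  simpa using mainA tt []
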